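-- pv_equiv track=rewrite | github.com/Feifei84/leetcode | 初级算法/数组/test.py | kSimilarity_V2
-- ===== SOURCE A (Python) =====
-- def kSimilarity_V2(s1: str, s2: str) -> int:
--     def count(s1: str, s2: str):
--         i = 0
--         while i < len(s1):
--             if s1[i] == s2[i]:
--                 s1 = s1[:i] + s1[i + 1:]
--                 s2 = s2[:i] + s2[i + 1:]
--             else:
--                 i += 1
--         if len(s1) == 0:
--             return 0
--         for i in range(len(s1)):
--             for j in range(len(s2)):
--                 if s1[i] == s2[j] and s2[i] == s1[j]:
--                     s2 = s2[:i] + s1[i] + s2[i + 1:j] + s1[j] + s2[j + 1:]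
--                     return 1 + count(s1, s2)
--         for i in range(len(s1)):
--             for j in range(len(s2)):
--                 if s1[i] == s2[j]:
--                     s2 = s2[:i] + s2[j] + s2[i + 1:j] + s2[i] + s2[j + 1:]
--                     return 1 + count(s1, s2)
--     return count(s1, s2)
-- ===== SOURCE B (Python) =====
-- def kSimilarity_V2(s1: str, s2: str) -> int:
--     res = 0
--     while True:
--         pairs = [(a, b) for a, b in zip(s1, s2) if a != b]
--         if not pairs:
--             return res
--         s1 = ''.join(a for a, _ in pairs)
--         s2 = ''.join(b for _, b in pairs)
--         n = len(pairs)
--         swap = None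
--         for i in range(n):
--             for j in range(i + 1, n):
--                 if s1[i] == s2[j] and s2[i] == s1[j]:
--                     swap = (i, j)
--                     break
--             if swap:
--                 break
--         if swap is None:
--             swap = (0, s2.index(s1[0], 1))
--         i, j = swap
--         l = list(s2)
--         l[i], l[j] = l[j], l[i]
--         s2 = ''.join(l)
--         res += 1
-- ===== Notes on version B (the rewrite author's own statement) =====
-- stated objective: faster
-- what changed: Replaces the recursive count (re-entered after every swap, with index-based while-loop stripping via string slicing and splice-slicing updates) by one iterative loop with an accumulator: matched positions are stripped by a single zip/filter pass instead of repeated O(n) string re-slicing, the 2-cycle search scans only the upper triangle i<j (exploiting the symmetry of A's condition), the one-fixing swap uses str.index, and both swap kinds are a uniform element swap on a char list.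
-- outside the precondition, e.g. on kSimilarity_V2('ba', 'abX'): A returns 1, B returns 1; on kSimilarity_V2('ab', 'ca'): A raises TypeError, B raises ValueError; on kSimilarity_V2('a', 'b'): A returns None, B raises ValueError
import Mathlib
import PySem

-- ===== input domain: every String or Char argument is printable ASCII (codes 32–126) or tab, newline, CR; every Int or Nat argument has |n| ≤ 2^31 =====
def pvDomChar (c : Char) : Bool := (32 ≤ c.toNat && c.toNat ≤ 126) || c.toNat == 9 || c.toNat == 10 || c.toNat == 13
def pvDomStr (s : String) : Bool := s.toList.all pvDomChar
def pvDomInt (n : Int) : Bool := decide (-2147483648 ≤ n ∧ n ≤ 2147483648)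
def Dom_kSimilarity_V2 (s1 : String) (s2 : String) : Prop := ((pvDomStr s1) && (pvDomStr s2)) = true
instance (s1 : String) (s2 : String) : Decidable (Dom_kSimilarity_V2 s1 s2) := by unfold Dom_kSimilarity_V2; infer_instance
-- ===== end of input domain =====

-- B rewrites A's recursive greedy (while-loop stripping by repeated string slicing, full nested
-- scans, slice-splicing, recursion after each swap) as one iterative loop with an accumulator:
-- one zip/filter pass strips matched positions, the 2-cycle scan covers only the upper triangle
-- i<j, str.index finds the one-fixing swap, and both swap kinds are a uniform element swap
-- (measured faster); equal values on Pre_ (anagrams, or s1 a character-wise prefix of s2).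

-- ===== PORT A =====
-- the inner `while i < len(s1)` stripping loop; fuel is a totality guard only (the measure
-- len(s1)-i drops by 1 each step, and every caller passes fuel > len(s1)-i).
-- s1[:i]+s1[i+1:] = take i ++ drop (i+1) (i ≥ 0, in range).  The comparison s1[i] == s2[i] is
-- ported as l1[i]? == l2[i]?: exact whenever i < len(l2) (under Pre_; Python raises IndexError
-- where l2[i]? = none).
def stripA : Nat → Nat → List Char → List Char → List Char × List Char
  | 0, _, l1, l2 => (l1, l2)
  | fuel+1, i, l1, l2 =>
    if i < l1.length then
      if l1[i]? == l2[i]? then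
        stripA fuel i (l1.take i ++ l1.drop (i+1)) (l2.take i ++ l2.drop (i+1))
      else
        stripA fuel (i+1) l1 l2
    else (l1, l2)

-- first nested scan: `for i in range(len(s1)): for j in range(len(s2)): if s1[i]==s2[j] and s2[i]==s1[j]`
-- (out-of-range reads, where Python raises IndexError, are none-comparisons here: outside Pre_)
def scan1A (u v : List Char) : Option (Nat × Nat) :=
  (List.range u.length).findSome? fun i =>
    (List.range v.length).findSome? fun j =>
      if u[i]? == v[j]? && v[i]? == u[j]? then some (i, j) else none

-- second nested scan: `if s1[i] == s2[j]`
def scan2A (u v : List Char) : Option (Nat × Nat) :=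
  (List.range u.length).findSome? fun i =>
    (List.range v.length).findSome? fun j =>
      if u[i]? == v[j]? then some (i, j) else none

-- the recursive `count`; fuel is a totality guard only (each recursion loses ≥ 1 mismatch, and
-- the top call passes fuel = len(s1)+1 > #mismatches).  At `none`/fuel-0 the Python returns
-- None or raises TypeError — outside Pre_, where this port returns 0.
-- s2[:i] + c + s2[i+1:j] + c' + s2[j+1:] = take i ++ [c] ++ (drop (i+1)).take (j-i-1) ++ [c'] ++ drop (j+1)
-- (exact also for j ≤ i: Python's empty slice = take 0); s1[i] is getD (in range by the scan).
def countA : Nat → List Char → List Char → Int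
  | 0, _, _ => 0
  | fuel+1, l1, l2 =>
    let p := stripA (l1.length + 1) 0 l1 l2
    let u := p.1
    let v := p.2
    if u.length = 0 then 0
    else
      match scan1A u v with
      | some (i, j) =>
          1 + countA fuel u (v.take i ++ [u.getD i ' '] ++ (v.drop (i+1)).take (j - i - 1) ++ [u.getD j ' '] ++ v.drop (j+1))
      | none =>
          match scan2A u v with
          | some (i, j) =>
              1 + countA fuel u (v.take i ++ [v.getD j ' '] ++ (v.drop (i+1)).take (j - i - 1) ++ [v.getD i ' '] ++ v.drop (j+1))
          | none => 0

def kSimilarity_V2 (s1 : String) (s2 : String) : Int :=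
  countA (s1.toList.length + 1) s1.toList s2.toList

-- ===== PORT B =====
-- `[(a, b) for a, b in zip(s1, s2) if a != b]`
def pairsB (l1 l2 : List Char) : List (Char × Char) :=
  (l1.zip l2).filter (fun p => p.1 != p.2)

-- B's upper-triangular break-scan: `for i in range(n): for j in range(i+1, n): …`
def scanB (u v : List Char) (n : Nat) : Option (Nat × Nat) :=
  (List.range n).findSome? fun i =>
    (List.range' (i+1) (n - (i+1))).findSome? fun j =>
      if u[i]? == v[j]? && v[i]? == u[j]? then some (i, j) else none

-- `l = list(s2); l[i], l[j] = l[j], l[i]` (both reads before the writes; indices in range)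
def swapB (v : List Char) (i j : Nat) : List Char :=
  (v.set i (v.getD j ' ')).set j (v.getD i ' ')

-- the `while True` loop with accumulator `res`; fuel is a totality guard only (each iteration
-- loses ≥ 1 mismatched pair; top call passes len(s1)+1).  `none` at index? is Python's
-- ValueError from s2.index (outside Pre_, where this port returns res).
def loopB : Nat → Int → List Char → List Char → Int
  | 0, res, _, _ => res
  | fuel+1, res, l1, l2 =>
    let prs := pairsB l1 l2
    if prs.length = 0 then res
    else
      let u := prs.map Prod.fst
      let v := prs.map Prod.snd
      let n := prs.length
      match scanB u v n with
      | some (i, j) => loopB fuel (res + 1) u (swapB v i j)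
      | none =>
          -- `s2.index(s1[0], 1)` = 1 + first index of s1[0] in s2[1:]
          match PySem.List.index? (v.drop 1) (u.getD 0 ' ') with
          | some k => loopB fuel (res + 1) u (swapB v 0 (k + 1))
          | none => res

def kSimilarity_V2_alt (s1 : String) (s2 : String) : Int :=
  loopB (s1.toList.length + 1) 0 s1.toList s2.toList

-- ===== PRECONDITION & SPEC =====
-- Pre_ excludes the inputs where A raises (IndexError/TypeError) or returns None instead of an
-- int — non-anagram pairs other than the character-wise-prefix case — together with the rare
-- longer-s2 inputs whose extra tail shares no character with s1 (A completes there too, and B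
-- agrees, but they are excluded; see the cites).
def Pre_kSimilarity_V2 (s1 : String) (s2 : String) : Prop :=
  s1.toList.Perm s2.toList ∨ s1.toList <+: s2.toList
instance (s1 : String) (s2 : String) : Decidable (Pre_kSimilarity_V2 s1 s2) := by
  unfold Pre_kSimilarity_V2; infer_instance

def pvWitness_kSimilarity_V2 : String × String := ("ab", "ba")

def Spec_kSimilarity_V2 (s1 : String) (s2 : String) (out : Int) : Prop := out = kSimilarity_V2_alt s1 s2
instance (s1 : String) (s2 : String) (out : Int) : Decidable (Spec_kSimilarity_V2 s1 s2 out) := by unfold Spec_kSimilarity_V2; infer_instance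

-- ===== CLAIM (what is proved, stated in full; the proofs are below) =====
def Claim_equal_kSimilarity_V2 : Prop := ∀ (s1 : String) (s2 : String), Dom_kSimilarity_V2 s1 s2 → Pre_kSimilarity_V2 s1 s2 → Spec_kSimilarity_V2 s1 s2 (kSimilarity_V2 s1 s2)

-- ===== LEMMAS AND PROOFS =====

theorem strip_go : ∀ (fuel i : Nat) (l1 l2 : List Char), l1.length = l2.length → l1.length ≤ i + fuel →
    stripA fuel i l1 l2 =
      (l1.take i ++ (pairsB (l1.drop i) (l2.drop i)).map Prod.fst,
       l2.take i ++ (pairsB (l1.drop i) (l2.drop i)).map Prod.snd) := by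
  intro fuel
  induction fuel with
  | zero =>
    intro i l1 l2 hlen hle
    have h1 : l1.drop i = [] := List.drop_eq_nil_of_le (by omega)
    have h2 : l2.drop i = [] := List.drop_eq_nil_of_le (by omega)
    have h3 : l1.take i = l1 := List.take_of_length_le (by omega)
    have h4 : l2.take i = l2 := List.take_of_length_le (by omega)
    rw [stripA, h1, h2, h3, h4]
    simp [pairsB]
  | succ fuel ih =>
    intro i l1 l2 hlen hle
    by_cases hi : i < l1.length
    · have hi2 : i < l2.length := hlen ▸ hi
      rw [stripA, if_pos hi]
      have hg1 : l1[i]? = some l1[i] := List.getElem?_eq_getElem hi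
      have hg2 : l2[i]? = some l2[i] := List.getElem?_eq_getElem hi2
      have hdrop1 : l1.drop i = l1[i] :: l1.drop (i+1) := List.drop_eq_getElem_cons hi
      have hdrop2 : l2.drop i = l2[i] :: l2.drop (i+1) := List.drop_eq_getElem_cons hi2
      have ht : l1.take (i+1) = l1.take i ++ [l1[i]] := by
        rw [List.take_add_one]; simp [hg1]
      have ht2 : l2.take (i+1) = l2.take i ++ [l2[i]] := by
        rw [List.take_add_one]; simp [hg2]
      by_cases heq : l1[i] = l2[i]
      · rw [if_pos (by simp [hg1, hg2, heq])]
        rw [ih i (l1.take i ++ l1.drop (i+1)) (l2.take i ++ l2.drop (i+1))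
          (by simp; omega) (by simp; omega)]
        have t1 : (l1.take i ++ l1.drop (i+1)).take i = l1.take i := by
          rw [List.take_append_of_le_length (by simp; omega)]; simp
        have t2 : (l2.take i ++ l2.drop (i+1)).take i = l2.take i := by
          rw [List.take_append_of_le_length (by simp; omega)]; simp
        have d1 : (l1.take i ++ l1.drop (i+1)).drop i = l1.drop (i+1) := by
          rw [List.drop_append_of_le_length (by simp; omega)]; simp
        have d2 : (l2.take i ++ l2.drop (i+1)).drop i = l2.drop (i+1) := by
          rw [List.drop_append_of_le_length (by simp; omega)]; simp
        rw [t1, t2, d1, d2, hdrop1, hdrop2]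
        have hpcons : pairsB (l1[i] :: l1.drop (i+1)) (l2[i] :: l2.drop (i+1))
            = pairsB (l1.drop (i+1)) (l2.drop (i+1)) := by
          simp only [pairsB, List.zip_cons_cons, List.filter_cons]
          simp [heq]
        rw [hpcons]
      · rw [if_neg (by simp [hg1, hg2, heq])]
        rw [ih (i+1) l1 l2 hlen (by omega), hdrop1, hdrop2]
        have hpcons : pairsB (l1[i] :: l1.drop (i+1)) (l2[i] :: l2.drop (i+1))
            = (l1[i], l2[i]) :: pairsB (l1.drop (i+1)) (l2.drop (i+1)) := by
          simp only [pairsB, List.zip_cons_cons, List.filter_cons]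
          simp [bne_iff_ne.mpr heq]
        rw [hpcons, ht, ht2]
        simp only [List.map_cons, List.append_assoc, List.singleton_append]
    · rw [stripA, if_neg hi]
      have h1 : l1.drop i = [] := List.drop_eq_nil_of_le (by omega)
      have h2 : l2.drop i = [] := List.drop_eq_nil_of_le (by omega)
      have h3 : l1.take i = l1 := List.take_of_length_le (by omega)
      have h4 : l2.take i = l2 := List.take_of_length_le (by omega)
      rw [h1, h2, h3, h4]
      simp [pairsB]

theorem strip_eq (l1 l2 : List Char) (hlen : l1.length = l2.length) :
    stripA (l1.length + 1) 0 l1 l2 = ((pairsB l1 l2).map Prod.fst, (pairsB l1 l2).map Prod.snd) := by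
  rw [strip_go (l1.length + 1) 0 l1 l2 hlen (by omega)]
  simp

-- first-hit characterisation of findSome? over List.range
theorem findSome?_range_first {β : Type} (f : Nat → Option β) (n j0 : Nat) (hj0 : j0 < n)
    (hmiss : ∀ k, k < j0 → f k = none) (hsome : f j0 ≠ none) :
    (List.range n).findSome? f = f j0 := by
  have hsplit : List.range n = List.range' 0 j0 ++ List.range' j0 (n - j0) := by
    conv_lhs => rw [List.range_eq_range', show n = j0 + (n - j0) from by omega]
    rw [← List.range'_append]
    norm_num
  rw [hsplit, List.findSome?_append]
  have h0 : (List.range' 0 j0).findSome? f = none := by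
    rw [List.findSome?_eq_none_iff]
    intro k hk
    rw [List.mem_range'_1] at hk
    exact hmiss k (by omega)
  rw [h0, Option.none_or]
  have : List.range' j0 (n - j0) = j0 :: List.range' (j0+1) (n - j0 - 1) := by
    rw [show n - j0 = (n - j0 - 1) + 1 from by omega, List.range'_succ]
    norm_num
  rw [this, List.findSome?_cons]
  cases h : f j0 with
  | none => exact absurd h hsome
  | some r => rfl

theorem tri_go (P : Nat → Nat → Bool) (n : Nat)
    (hsym : ∀ i j, i < n → j < n → P i j = P j i)
    (hdiag : ∀ i, i < n → P i i = false) :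
    ∀ (m a : Nat), a + m = n → (∀ k, k < a → ∀ j, j < n → P k j = false) →
    (List.range' a m).findSome? (fun i => (List.range' 0 n).findSome? (fun j => if P i j then some (i, j) else none))
      = (List.range' a m).findSome? (fun i => (List.range' (i+1) (n - (i+1))).findSome? (fun j => if P i j then some (i, j) else none)) := by
  intro m
  induction m with
  | zero => intro a _ _; rfl
  | succ m ih =>
    intro a ha hprev
    have han : a < n := by omega
    have key : (List.range' 0 n).findSome? (fun j => if P a j then some (a, j) else none)
        = (List.range' (a+1) (n - (a+1))).findSome? (fun j => if P a j then some (a, j) else none) := by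
      have hsplit : List.range' 0 n = List.range' 0 (a+1) ++ List.range' (a+1) (n - (a+1)) := by
        conv_lhs => rw [show n = (a+1) + (n - (a+1)) from by omega]
        rw [← List.range'_append]
        norm_num
      rw [hsplit, List.findSome?_append]
      have h0 : (List.range' 0 (a+1)).findSome? (fun j => if P a j then some (a, j) else none) = none := by
        rw [List.findSome?_eq_none_iff]
        intro j hj
        rw [List.mem_range'_1] at hj
        have : P a j = false := by
          rcases Nat.lt_or_ge j a with hja | hja
          · rw [hsym a j han (by omega)]
            exact hprev j hja a han
          · have : j = a := by omega
            subst this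
            exact hdiag j han
        simp [this]
      rw [h0, Option.none_or]
    rw [List.range'_succ, List.findSome?_cons, List.findSome?_cons, key]
    cases hfa : (List.range' (a+1) (n - (a+1))).findSome? (fun j => if P a j then some (a, j) else none) with
    | some r => rfl
    | none =>
      apply ih (a+1) (by omega)
      intro k hk j hj
      rcases Nat.lt_or_ge k a with hka | hka
      · exact hprev k hka j hj
      · have hk : k = a := by omega
        subst hk
        rcases Nat.lt_or_ge j (k+1) with hja | hja
        · rcases Nat.lt_or_ge j k with hjk | hjk
          · rw [hsym k j han hj]
            exact hprev j hjk k han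
          · have : j = k := by omega
            subst this
            exact hdiag j hj
        · have := List.findSome?_eq_none_iff.mp hfa j (by rw [List.mem_range'_1]; omega)
          by_contra hPj
          rw [if_pos (by revert hPj; cases P k j <;> simp)] at this
          exact Option.some_ne_none _ this

theorem beq_symm_opt (a b : Option Char) : (a == b) = (b == a) := by
  by_cases h : a = b
  · subst h; rfl
  · rw [beq_eq_false_iff_ne.mpr h, beq_eq_false_iff_ne.mpr (fun e => h e.symm)]

-- A's full first scan equals B's upper-triangular scan (the condition is symmetric and
-- false on the diagonal of a fully mismatched state)
theorem scan1_eq_scanB (u v : List Char) (n : Nat) (hu : u.length = n) (hv : v.length = n)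
    (hmis : ∀ k, k < n → u[k]? ≠ v[k]?) :
    scan1A u v = scanB u v n := by
  unfold scan1A scanB
  rw [hu, hv, List.range_eq_range']
  exact tri_go (fun i j => u[i]? == v[j]? && v[i]? == u[j]?) n
    (fun i j hi hj => by
      show (u[i]? == v[j]? && v[i]? == u[j]?) = (u[j]? == v[i]? && v[j]? == u[i]?)
      rw [Bool.and_comm, beq_symm_opt (v[i]?) (u[j]?), beq_symm_opt (u[i]?) (v[j]?)])
    (fun i hi => by
      show (u[i]? == v[i]? && v[i]? == u[i]?) = false
      have := hmis i hi
      simp [this])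
    n 0 (by omega) (by omega)

theorem scanB_some (u v : List Char) (n : Nat) (i j : Nat) (h : scanB u v n = some (i, j)) :
    i < j ∧ j < n ∧ (u[i]? == v[j]? && v[i]? == u[j]?) = true := by
  unfold scanB at h
  obtain ⟨i0, hi0, hinner⟩ := List.exists_of_findSome?_eq_some h
  obtain ⟨j0, hj0, hif⟩ := List.exists_of_findSome?_eq_some hinner
  rw [List.mem_range'_1] at hj0
  by_cases hP : (u[i0]? == v[j0]? && v[i0]? == u[j0]?) = true
  · rw [if_pos hP] at hif
    obtain ⟨rfl, rfl⟩ : i0 = i ∧ j0 = j := by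
      constructor <;> [exact (Prod.mk.injEq _ _ _ _ ▸ Option.some.inj hif).1;
        exact (Prod.mk.injEq _ _ _ _ ▸ Option.some.inj hif).2]
    exact ⟨by omega, by omega, hP⟩
  · rw [if_neg hP] at hif
    exact absurd hif (Option.some_ne_none _).symm

-- A's splice s2[:i] + c + s2[i+1:j] + c' + s2[j+1:] IS the element swap, for i < j < len
theorem splice_eq_set_set (v : List Char) (i j : Nat) (a b : Char) (hij : i < j) (hj : j < v.length) :
    v.take i ++ [a] ++ (v.drop (i+1)).take (j - i - 1) ++ [b] ++ v.drop (j+1) = (v.set i a).set j b := by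
  apply List.ext_getElem
  · simp
    omega
  · intro k h1 h2
    simp only [List.getElem_append, List.getElem_take, List.getElem_drop, List.getElem_set,
      List.length_append, List.length_take, List.length_drop, List.length_singleton,
      List.getElem_singleton]
    split_ifs <;> first
      | rfl
      | omega
      | (congr 1; omega)

theorem swapB_perm (v : List Char) (i j : Nat) (hij : i < j) (hj : j < v.length) :
    (swapB v i j).Perm v := by
  have hi : i < v.length := by omega
  have hswap : swapB v i j = v.take i ++ [v[j]] ++ (v.drop (i+1)).take (j - i - 1) ++ [v[i]] ++ v.drop (j+1) := by
    rw [swapB, List.getD_eq_getElem v ' ' hj, List.getD_eq_getElem v ' ' hi]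
    exact (splice_eq_set_set v i j v[j] v[i] hij hj).symm
  have hv0 : (v.set i v[i]).set j v[j] = v := by
    rw [List.set_getElem_self hi, List.set_getElem_self hj]
  have hsp := splice_eq_set_set v i j v[i] v[j] hij hj
  rw [hv0] at hsp
  rw [hswap]
  conv_rhs => rw [← hsp]
  simp only [List.append_assoc, List.cons_append]
  apply List.Perm.append_left
  exact (List.Perm.cons _ List.perm_middle).trans
    ((List.Perm.swap _ _ _).trans (List.Perm.cons _ List.perm_middle.symm))

theorem pairsB_mem_ne (l1 l2 : List Char) (p : Char × Char) (hp : p ∈ pairsB l1 l2) : p.1 ≠ p.2 := by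
  have := List.of_mem_filter hp
  exact bne_iff_ne.mp this

theorem pairsB_mis (l1 l2 : List Char) (k : Nat) (hk : k < (pairsB l1 l2).length) :
    ((pairsB l1 l2).map Prod.fst)[k]? ≠ ((pairsB l1 l2).map Prod.snd)[k]? := by
  rw [List.getElem?_map, List.getElem?_map, List.getElem?_eq_getElem hk]
  simp only [Option.map_some]
  intro h
  exact pairsB_mem_ne l1 l2 _ (List.getElem_mem hk) (Option.some.inj h)

-- multisets of mismatched left and right characters agree for an anagram pair
theorem pairsB_perm (l1 l2 : List Char) (hlen : l1.length = l2.length) (hperm : l1.Perm l2) :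
    ((pairsB l1 l2).map Prod.fst).Perm ((pairsB l1 l2).map Prod.snd) := by
  have hsplit := List.filter_append_perm (fun p => p.1 != p.2) (l1.zip l2)
  have hC : ((l1.zip l2).filter (fun p => !(p.1 != p.2))).map Prod.fst
      = ((l1.zip l2).filter (fun p => !(p.1 != p.2))).map Prod.snd := by
    apply List.map_congr_left
    intro p hp
    have := List.of_mem_filter hp
    simpa using this
  have h1 : ((pairsB l1 l2).map Prod.fst ++ ((l1.zip l2).filter (fun p => !(p.1 != p.2))).map Prod.fst).Perm l1 := by
    have := hsplit.map Prod.fst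
    rw [List.map_append] at this
    rw [List.map_fst_zip (by omega : l1.length ≤ l2.length)] at this
    exact this
  have h2 : ((pairsB l1 l2).map Prod.snd ++ ((l1.zip l2).filter (fun p => !(p.1 != p.2))).map Prod.snd).Perm l2 := by
    have := hsplit.map Prod.snd
    rw [List.map_append] at this
    rw [List.map_snd_zip (by omega : l2.length ≤ l1.length)] at this
    exact this
  rw [← hC] at h2
  have hcat := (h1.trans hperm).trans h2.symm
  rw [← Multiset.coe_eq_coe] at hcat ⊢
  rw [← Multiset.coe_add, ← Multiset.coe_add] at hcat
  exact add_right_cancel hcat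

-- one position made equal ⇒ strictly fewer mismatch pairs than the (fully mismatched) length
theorem mism_lt (u v' : List Char) (n : Nat) (hu : u.length = n) (hv' : v'.length = n)
    (i : Nat) (hi : i < n) (heq : u[i]'(by omega) = v'[i]'(by omega)) :
    (pairsB u v').length < n := by
  have hzlen : (u.zip v').length = n := by
    rw [List.length_zip, hu, hv']
    omega
  have hlt : ((u.zip v').filter (fun p => p.1 != p.2)).length < (u.zip v').length := by
    rw [List.length_filter_lt_length_iff_exists]
    refine ⟨(u.zip v')[i]'(by omega), List.getElem_mem _, ?_⟩
    rw [List.getElem_zip]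
    simp [heq]
  rw [pairsB]
  omega

theorem pairsB_length_le (l1 l2 : List Char) : (pairsB l1 l2).length ≤ l1.length := by
  have h1 := List.length_filter_le (fun p => p.1 != p.2) (l1.zip l2)
  have h2 := List.length_zip (l₁ := l1) (l₂ := l2)
  rw [pairsB]
  omega

-- when no 2-cycle exists, A's second scan fires at i = 0 with the first j ≥ 1 such that
-- v[j] = u[0] — exactly B's s2.index(s1[0], 1)
theorem scan2_index (u v : List Char) (n : Nat) (hu : u.length = n) (hv : v.length = n)
    (hn : 0 < n) (hperm : u.Perm v) (hmis : ∀ k, k < n → u[k]? ≠ v[k]?) :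
    ∃ j0 : Nat, 0 < j0 ∧ j0 < n ∧
      PySem.List.index? (v.drop 1) (u.getD 0 ' ') = some (j0 - 1) ∧
      scan2A u v = some (0, j0) ∧
      v[j0]? = u[0]? := by
  have h0u : 0 < u.length := by omega
  have h0v : 0 < v.length := by omega
  have hc : u[0] ∈ v := hperm.subset (List.getElem_mem h0u)
  have hidx : ∃ j0, PySem.List.index? v u[0] = some j0 := by
    have := PySem.List.index?_isSome_iff (xs := v) (v := u[0])
    rcases h : PySem.List.index? v u[0] with _ | j0
    · rw [h] at this
      simp at this
      exact absurd hc this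
    · exact ⟨j0, rfl⟩
  obtain ⟨j0, hj0⟩ := hidx
  obtain ⟨hj0lt, hj0eq, hj0min⟩ := PySem.List.getElem_of_index?_eq_some hj0
  have hne0 : v[0] ≠ u[0] := by
    intro h
    apply hmis 0 hn
    rw [List.getElem?_eq_getElem h0u, List.getElem?_eq_getElem h0v, h]
  have hj0pos : 0 < j0 := by
    rcases Nat.eq_zero_or_pos j0 with h | h
    · subst h
      exact absurd hj0eq hne0
    · exact h
  have hgetD : u.getD 0 ' ' = u[0] := List.getD_eq_getElem u ' ' h0u
  -- index on the tail
  have hdropidx : PySem.List.index? (v.drop 1) (u.getD 0 ' ') = some (j0 - 1) := by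
    obtain ⟨b, vt, rfl⟩ : ∃ b vt, v = b :: vt := by
      cases v with
      | nil => simp at h0v
      | cons b vt => exact ⟨b, vt, rfl⟩
    have hb : b ≠ u[0] := hne0
    rw [PySem.List.index?_cons_of_ne vt hb] at hj0
    rcases h : PySem.List.index? vt u[0] with _ | k
    · rw [h] at hj0
      simp at hj0
    · rw [h] at hj0
      simp only [Option.map_some] at hj0
      have hk : k + 1 = j0 := Option.some.inj hj0
      rw [hgetD, List.drop_succ_cons, List.drop_zero, h]
      congr 1
      omega
  refine ⟨j0, hj0pos, by omega, hdropidx, ?_, by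
    rw [List.getElem?_eq_getElem hj0lt, List.getElem?_eq_getElem h0u, hj0eq]⟩
  -- the second scan
  unfold scan2A
  have hinner : (List.range v.length).findSome? (fun j => if u[0]? == v[j]? then some ((0:Nat), j) else none)
      = some (0, j0) := by
    rw [findSome?_range_first _ v.length j0 hj0lt]
    · rw [if_pos]
      rw [List.getElem?_eq_getElem h0u, List.getElem?_eq_getElem hj0lt, hj0eq]
      simp
    · intro k hk
      rw [if_neg]
      intro hcontra
      have hkv : k < v.length := by omega
      rw [List.getElem?_eq_getElem h0u, List.getElem?_eq_getElem hkv] at hcontra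
      exact hj0min k hk (Eq.symm (by simpa using hcontra))
    · rw [if_pos]
      · exact Option.some_ne_none _
      · rw [List.getElem?_eq_getElem h0u, List.getElem?_eq_getElem hj0lt, hj0eq]
        simp
  rw [findSome?_range_first _ u.length 0 h0u (by omega) (by rw [hinner]; exact Option.some_ne_none _)]
  exact hinner

theorem mainEq : ∀ (fa fb : Nat) (res : Int) (l1 l2 : List Char),
    l1.length = l2.length → l1.Perm l2 →
    (pairsB l1 l2).length < fa → (pairsB l1 l2).length < fb →
    loopB fb res l1 l2 = res + countA fa l1 l2 := by
  intro fa
  induction fa with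
  | zero => intro fb res l1 l2 _ _ hfa _; omega
  | succ fa ih =>
    intro fb res l1 l2 hlen hperm hfa hfb
    cases fb with
    | zero => omega
    | succ fb =>
      simp only [countA, loopB, strip_eq l1 l2 hlen, List.length_map]
      by_cases hP : (pairsB l1 l2).length = 0
      · simp [hP]
      · have hn : 0 < (pairsB l1 l2).length := Nat.pos_of_ne_zero hP
        rw [if_neg hP, if_neg hP]
        set P := pairsB l1 l2 with hPdef
        set u := P.map Prod.fst with hudef
        set v := P.map Prod.snd with hvdef
        have hu : u.length = P.length := by rw [hudef, List.length_map]
        have hv : v.length = P.length := by rw [hvdef, List.length_map]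
        have hmis : ∀ k, k < P.length → u[k]? ≠ v[k]? := fun k hk => pairsB_mis l1 l2 k hk
        have hupv : u.Perm v := pairsB_perm l1 l2 hlen hperm
        rw [scan1_eq_scanB u v P.length hu hv hmis]
        cases hscan : scanB u v P.length with
        | some ij =>
          obtain ⟨i, j⟩ := ij
          dsimp only
          obtain ⟨hij, hjn, hcond⟩ := scanB_some u v P.length i j hscan
          have hiu : i < u.length := by omega
          have hju : j < u.length := by omega
          have hiv : i < v.length := by omega
          have hjv : j < v.length := by omega
          have hcond' : u[i] = v[j] ∧ v[i] = u[j] := by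
            rw [List.getElem?_eq_getElem hiu, List.getElem?_eq_getElem hjv,
              List.getElem?_eq_getElem hiv, List.getElem?_eq_getElem hju] at hcond
            simpa using hcond
          have hsplice : v.take i ++ [u.getD i ' '] ++ (v.drop (i+1)).take (j - i - 1) ++ [u.getD j ' '] ++ v.drop (j+1) = swapB v i j := by
            rw [List.getD_eq_getElem u ' ' hiu, List.getD_eq_getElem u ' ' hju,
              splice_eq_set_set v i j _ _ hij hjv]
            simp only [swapB]
            rw [List.getD_eq_getElem v ' ' hjv, List.getD_eq_getElem v ' ' hiv,
              hcond'.1, hcond'.2]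
          have hv'len : (swapB v i j).length = P.length := by
            simp only [swapB, List.length_set]
            exact hv
          have hv'i : u[i]'(by omega) = (swapB v i j)[i]'(by omega) := by
            simp only [swapB]
            rw [List.getElem_set_ne (by omega), List.getElem_set_self (by simpa using hiv),
              List.getD_eq_getElem v ' ' hjv, hcond'.1]
          have hmism' : (pairsB u (swapB v i j)).length < P.length :=
            mism_lt u (swapB v i j) P.length hu hv'len i (by omega) hv'i
          have hperm' : u.Perm (swapB v i j) := hupv.trans (swapB_perm v i j hij hjv).symm
          rw [hsplice]
          rw [ih fb (res+1) u (swapB v i j) (by omega) hperm' (by omega) (by omega)]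
          ring
        | none =>
          obtain ⟨j0, hj0pos, hj0n, hidx, hscan2, hvj0⟩ := scan2_index u v P.length hu hv hn hupv hmis
          rw [hscan2, hidx]
          dsimp only
          have hj0v : j0 < v.length := by omega
          have h0v : 0 < v.length := by omega
          have h0u : 0 < u.length := by omega
          have hk1 : j0 - 1 + 1 = j0 := by omega
          have hsplice : v.take 0 ++ [v.getD j0 ' '] ++ (v.drop (0+1)).take (j0 - 0 - 1) ++ [v.getD 0 ' '] ++ v.drop (j0+1) = swapB v 0 j0 := by
            simp only [swapB]
            exact splice_eq_set_set v 0 j0 _ _ hj0pos hj0v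
          have hv'len : (swapB v 0 j0).length = P.length := by
            simp only [swapB, List.length_set]
            exact hv
          have hv'0 : u[0]'(by omega) = (swapB v 0 j0)[0]'(by omega) := by
            simp only [swapB]
            rw [List.getElem_set_ne (by omega), List.getElem_set_self (by simpa using h0v),
              List.getD_eq_getElem v ' ' hj0v]
            rw [List.getElem?_eq_getElem hj0v, List.getElem?_eq_getElem h0u] at hvj0
            exact (Option.some.inj hvj0).symm
          have hmism' : (pairsB u (swapB v 0 j0)).length < P.length :=
            mism_lt u (swapB v 0 j0) P.length hu hv'len 0 (by omega) hv'0
          have hperm' : u.Perm (swapB v 0 j0) := hupv.trans (swapB_perm v 0 j0 hj0pos hj0v).symm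
          rw [hsplice, hk1]
          rw [ih fb (res+1) u (swapB v 0 j0) (by omega) hperm' (by omega) (by omega)]
          ring

-- when s1 is a character-wise prefix of s2, the stripping loop empties s1
theorem strip_prefix : ∀ (l1 : List Char) (fuel : Nat) (l2 : List Char),
    l1 <+: l2 → l1.length < fuel → (stripA fuel 0 l1 l2).1 = [] := by
  intro l1
  induction l1 with
  | nil =>
    intro fuel l2 _ hf
    cases fuel with
    | zero => omega
    | succ f => rw [stripA]; simp
  | cons a t ihl =>
    intro fuel l2 hpre hf
    obtain ⟨r, rfl⟩ := hpre
    cases fuel with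
    | zero => simp at hf
    | succ f =>
      rw [stripA, if_pos (by simp)]
      rw [if_pos (by simp)]
      have h1 : (a :: t).take 0 ++ (a :: t).drop 1 = t := by simp
      have h2 : ((a :: t) ++ r).take 0 ++ ((a :: t) ++ r).drop 1 = t ++ r := by simp
      rw [h1, h2]
      exact ihl f (t ++ r) (List.prefix_append t r) (by simp at hf ⊢; omega)

theorem pairsB_prefix (l1 l2 : List Char) (h : l1 <+: l2) : pairsB l1 l2 = [] := by
  obtain ⟨r, rfl⟩ := h
  induction l1 with
  | nil => rfl
  | cons a t ih =>
    show pairsB (a :: t) ((a :: t) ++ r) = []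
    rw [pairsB, List.cons_append, List.zip_cons_cons, List.filter_cons]
    simp only [bne_self_eq_false]
    exact ih

theorem kSim_prefix (s1 s2 : String) (h : s1.toList <+: s2.toList) :
    kSimilarity_V2 s1 s2 = 0 ∧ kSimilarity_V2_alt s1 s2 = 0 := by
  constructor
  · rw [kSimilarity_V2, countA]
    have := strip_prefix s1.toList (s1.toList.length + 1) s2.toList h (by omega)
    simp only [this]
    simp
  · rw [kSimilarity_V2_alt, loopB]
    rw [pairsB_prefix s1.toList s2.toList h]
    simp

theorem kSim_perm (s1 s2 : String) (h : s1.toList.Perm s2.toList) :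
    kSimilarity_V2 s1 s2 = kSimilarity_V2_alt s1 s2 := by
  rw [kSimilarity_V2, kSimilarity_V2_alt]
  have hlen : s1.toList.length = s2.toList.length := h.length_eq
  have hle := pairsB_length_le s1.toList s2.toList
  rw [mainEq (s1.toList.length + 1) (s1.toList.length + 1) 0 s1.toList s2.toList hlen h
    (by omega) (by omega)]
  ring

-- ===== VERDICT (by name: the statement is the Claim_ definition above) =====
theorem kSimilarity_V2_spec : Claim_equal_kSimilarity_V2 := by
  intro s1 s2 _ hpre
  unfold Spec_kSimilarity_V2
  rcases hpre with h | h
  · exact kSim_perm s1 s2 h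
  · rw [(kSim_prefix s1 s2 h).1, (kSim_prefix s1 s2 h).2]
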